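-- pv_equiv track=rewrite | github.com/yastrebdev/python_without_problems | 07_reading_from_and_writing_to_files/06_cow_gymnastics/main.py | filter_nested_lists
-- ===== SOURCE A (Python) =====
-- def filter_nested_lists(lst, min_count):
--     tuple_list = [tuple(sublist) for sublist in lst]
--
--     element_counts = {}
--     for elem in tuple_list:
--         if elem in element_counts:
--             element_counts[elem] += 1
--         else:
--             element_counts[elem] = 1
--
--     filtered_tuples = [elem for elem in tuple_list if element_counts[elem] >= min_count]
--
--     filtered_lists = [list(sublist) for sublist in filtered_tuples]
--     unique_list = list(map(list, set(map(tuple, filtered_lists))))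
--
--     return len(unique_list)
-- ===== SOURCE B (Python) =====
-- def filter_nested_lists(lst, min_count):
--     total = 0
--     for i, s in enumerate(lst):
--         if s not in lst[:i] and lst.count(s) >= min_count:
--             total += 1
--     return total
-- ===== Notes on version B (the rewrite author's own statement) =====
-- stated objective: alternative
-- what changed: B drops A's frequency dict, re-filter and set-dedup passes entirely: a single dict-free scan counts each element at its first occurrence (checked against the prefix) whose total occurrence count meets the threshold.
import Mathlib
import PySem

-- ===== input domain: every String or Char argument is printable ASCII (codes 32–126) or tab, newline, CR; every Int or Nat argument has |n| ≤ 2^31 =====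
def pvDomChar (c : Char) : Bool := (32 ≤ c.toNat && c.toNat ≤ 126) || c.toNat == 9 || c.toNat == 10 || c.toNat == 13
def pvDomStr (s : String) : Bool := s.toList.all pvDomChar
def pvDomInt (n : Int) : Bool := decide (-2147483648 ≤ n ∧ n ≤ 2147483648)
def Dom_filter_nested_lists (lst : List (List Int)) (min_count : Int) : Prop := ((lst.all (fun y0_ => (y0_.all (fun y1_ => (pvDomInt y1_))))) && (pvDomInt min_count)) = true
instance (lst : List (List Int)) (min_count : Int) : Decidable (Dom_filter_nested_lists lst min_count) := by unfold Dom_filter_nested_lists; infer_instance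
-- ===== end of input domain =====

-- B replaces A's dict-of-counts, re-filter, tuple/list round-trips and set dedup by a single
-- dict-free scan that counts first occurrences whose total count meets the threshold
-- (objective: alternative decomposition; B is O(n^2) where A is hash-based).

-- ===== PORT A =====
-- tuples ↔ lists are both List Int here, so tuple()/list() round-trips are identities.
def filter_nested_lists (lst : List (List Int)) (min_count : Int) : Int :=
  let tuple_list := lst.map (fun sublist => sublist)
  let element_counts := tuple_list.foldl
    (fun d elem =>
      if d.contains elem then d.insert elem (d.getD elem 0 + 1)
      else d.insert elem 1)
    PySem.Dict.empty
  -- element_counts[elem]: the key is always present, so getD is exact here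
  let filtered_tuples := tuple_list.filter (fun elem => min_count ≤ element_counts.getD elem 0)
  let filtered_lists := filtered_tuples.map (fun sublist => sublist)
  let unique_list := PySem.Set.ofList (filtered_lists.map (fun x => x))
  (unique_list.length : Int)

-- ===== PORT B =====
def filter_nested_lists_alt (lst : List (List Int)) (min_count : Int) : Int :=
  (PySem.List.enumerate lst 0).foldl
    (fun total p =>
      if p.2 ∉ PySem.List.slice lst none (some p.1)
          ∧ min_count ≤ (PySem.List.count lst p.2 : Int)
      then total + 1 else total)
    0

-- ===== PRECONDITION & SPEC =====
def Spec_filter_nested_lists (lst : List (List Int)) (min_count : Int) (out : Int) : Prop := out = filter_nested_lists_alt lst min_count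
instance (lst : List (List Int)) (min_count : Int) (out : Int) : Decidable (Spec_filter_nested_lists lst min_count out) := by unfold Spec_filter_nested_lists; infer_instance

-- ===== CLAIM (what is proved, stated in full; the proofs are below) =====
def Claim_equal_filter_nested_lists : Prop := ∀ (lst : List (List Int)) (min_count : Int), Dom_filter_nested_lists lst min_count → Spec_filter_nested_lists lst min_count (filter_nested_lists lst min_count)

-- ===== LEMMAS AND PROOFS =====

-- A's hand-rolled counting loop is collections.Counter's update step.
theorem stepA_eq_modify (d : PySem.Dict (List Int) Int) (e : List Int) :
    (if d.contains e then d.insert e (d.getD e 0 + 1) else d.insert e 1)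
      = d.modify e 0 (· + 1) := by
  by_cases h : d.contains e = true
  · simp [h, PySem.Dict.modify]
  · have h2 : d.get? e = none := by
      rcases h3 : d.get? e with _ | v
      · rfl
      · exact absurd (by rw [PySem.Dict.contains_eq_isSome_get?, h3]; rfl) h
    simp [h, PySem.Dict.modify, PySem.Dict.getD, h2]

theorem dictA_eq_counter (lst : List (List Int)) :
    lst.foldl (fun d elem =>
      if d.contains elem then d.insert elem (d.getD elem 0 + 1)
      else d.insert elem 1) PySem.Dict.empty = PySem.Dict.counter lst := by
  unfold PySem.Dict.counter
  have h : (fun (d : PySem.Dict (List Int) Int) elem =>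
      if d.contains elem then d.insert elem (d.getD elem 0 + 1)
      else d.insert elem 1) = fun d elem => d.modify elem 0 (· + 1) := by
    funext d e; exact stepA_eq_modify d e
  rw [h]

-- dedup commutes with filtering by a count-based (occurrence-invariant) predicate
theorem set_filter_comm (q : List Int → Bool) (lst : List (List Int)) :
    (PySem.Set.ofList (lst.filter q)).length
      = ((PySem.Set.ofList lst).filter q).length := by
  apply List.Perm.length_eq
  rw [List.perm_ext_iff_of_nodup (PySem.Set.nodup_ofList _) ((PySem.Set.nodup_ofList lst).filter q)]
  intro a
  simp [PySem.Set.mem_ofList, List.mem_filter]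

-- B's loop invariant: scanning the suffix, with 'pre' the already-scanned prefix of lst,
-- adds exactly the number of distinct elements of lst satisfying P first occurring in the suffix.
theorem altB_invariant (lst : List (List Int)) (P : List Int → Prop) [DecidablePred P] :
    ∀ (suf pre : List (List Int)) (acc : Int), lst = pre ++ suf →
      (PySem.List.enumerate suf (pre.length : Int)).foldl
        (fun total p =>
          if p.2 ∉ PySem.List.slice lst none (some p.1) ∧ P p.2
          then total + 1 else total) acc
      = acc + (((PySem.Set.ofList lst).filter (fun e => decide (P e))).length : Int)
            - (((PySem.Set.ofList pre).filter (fun e => decide (P e))).length : Int) := by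
  intro suf
  induction suf with
  | nil =>
      intro pre acc h
      subst h
      simp [PySem.List.enumerate]
  | cons s rest ih =>
      intro pre acc h
      rw [PySem.List.enumerate_cons, List.foldl_cons]
      have hslice : PySem.List.slice lst none (some ((pre.length : Nat) : Int)) = pre := by
        rw [PySem.List.slice_to_natCast, h, List.take_left]
      have hstep : ((pre.length : Int) + 1) = (((pre ++ [s]).length : Nat) : Int) := by
        simp
      have hlist : lst = (pre ++ [s]) ++ rest := by simp [h]
      have hset : (((PySem.Set.ofList (pre ++ [s])).filter (fun e => decide (P e))).length : Int)
          = (((PySem.Set.ofList pre).filter (fun e => decide (P e))).length : Int)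
            + (if s ∉ pre ∧ P s then 1 else 0) := by
        rw [PySem.Set.ofList_eq_foldl, List.foldl_append, ← PySem.Set.ofList_eq_foldl]
        show (((PySem.Set.add (PySem.Set.ofList pre) s).filter _).length : Int) = _
        by_cases hmem : s ∈ pre
        · have hc : PySem.Set.contains (PySem.Set.ofList pre) s = true := by
            simp [PySem.Set.contains, PySem.Set.mem_ofList, hmem]
          simp [PySem.Set.add, hmem]
        · have hc : PySem.Set.contains (PySem.Set.ofList pre) s = false := by
            simp [PySem.Set.contains, PySem.Set.mem_ofList, hmem]
          by_cases hP : P s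
          · simp [PySem.Set.add, hmem, hP, List.filter_append]
          · simp [PySem.Set.add, hmem, hP, List.filter_append]
      rw [hslice, hstep, ih (pre ++ [s]) _ hlist, hset]
      split_ifs with hc
      · omega
      · omega

theorem filter_nested_lists_spec : Claim_equal_filter_nested_lists := by
  intro lst min_count _
  unfold Spec_filter_nested_lists filter_nested_lists filter_nested_lists_alt
  simp only [List.map_id', dictA_eq_counter]
  have hB := altB_invariant lst (fun e => min_count ≤ (PySem.List.count lst e : Int))
      lst [] 0 (by simp)
  simp only [List.length_nil, Nat.cast_zero] at hB
  rw [hB]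
  simp [set_filter_comm, PySem.Dict.getD_counter, PySem.List.count_eq]
  rfl
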